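-- pv_equiv track=rewrite | github.com/RicardoBurboa/A01795061_A4.2 | Problema2/convert_numbers.py | decimal_to_hex_2s_complement
-- ===== SOURCE A (Python) =====
-- def decimal_to_hex_2s_complement(num, num_digits=10):
--     """Función que transforma un número decimal negativo a hexadecimal."""
--     if num >= 0:
--         hex_str = hex(num & (2**32-1))[2:].zfill(num_digits)
--     else:
--         pos_hex = hex(abs(num) & (2**32-1))[2:].zfill(num_digits)
--         inv_hex = ''.join(hex(15 - int(digit, 16))[2:] for digit in pos_hex)
--
--         carry = 1
--         result = ''
--         for digit in inv_hex[::-1]: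
--             current = int(digit, 16) + carry
--             if current > 15:
--                 result = hex(current % 16)[2:] + result
--                 carry = 1
--             else:
--                 result = hex(current)[2:] + result
--                 carry = 0
--
--         hex_str = result.zfill(num_digits)
--
--     return hex_str.upper()
-- ===== SOURCE B (Python) =====
-- def decimal_to_hex_2s_complement(num, num_digits=10):
--     """Decimal to hex 2's-complement string; closed-form arithmetic instead of digit loops."""
--     if num >= 0:
--         hex_str = hex(num & (2**32-1))[2:].zfill(num_digits)
--     else:
--         m = (-num) & (2**32 - 1)
--         w = max(len(hex(m)[2:]), num_digits)
--         val = (16**w - m) % 16**w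
--         hex_str = hex(val)[2:].zfill(w)
--     return hex_str.upper()
-- ===== Notes on version B (the rewrite author's own statement) =====
-- stated objective: simpler
-- what changed: The negative branch's two digit-wise passes (invert each hex digit, then an add-1 carry loop over the reversed string) are replaced by the arithmetic closed form of 2's complement, (16**w - m) % 16**w at width w, formatted once.
import Mathlib
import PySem

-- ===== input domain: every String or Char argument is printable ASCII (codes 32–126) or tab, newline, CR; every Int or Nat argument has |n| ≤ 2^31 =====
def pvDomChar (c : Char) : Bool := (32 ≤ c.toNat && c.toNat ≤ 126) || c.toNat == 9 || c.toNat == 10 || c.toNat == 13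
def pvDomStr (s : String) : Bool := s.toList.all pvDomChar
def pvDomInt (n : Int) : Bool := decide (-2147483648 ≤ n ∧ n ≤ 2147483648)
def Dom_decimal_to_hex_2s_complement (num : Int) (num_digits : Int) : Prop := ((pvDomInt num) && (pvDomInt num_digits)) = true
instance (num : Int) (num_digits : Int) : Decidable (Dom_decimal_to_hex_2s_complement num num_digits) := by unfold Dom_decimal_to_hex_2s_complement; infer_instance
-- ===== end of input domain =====

-- B replaces A's digit-wise invert-then-add-carry loops on the negative branch by the
-- arithmetic closed form of 2's complement, (16^w - m) mod 16^w, at the same width w (simpler).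

-- shared helpers for Python's hex builtin: hex(n)[2:] for n ≥ 0
def pvHexDigitChar (d : Nat) : Char := if d < 10 then Char.ofNat (48 + d) else Char.ofNat (87 + d)

-- int(c, 16) for a single lowercase hex digit char
def pvHexVal (c : Char) : Nat := if 97 ≤ c.toNat then c.toNat - 87 else c.toNat - 48

-- number of hex digits of n (= len(hex(n)[2:]))
def pvHexLen (n : Nat) : Nat :=
  if h : n < 16 then 1 else pvHexLen (n / 16) + 1
decreasing_by exact Nat.div_lt_self (by omega) (by omega)

-- the last L hex digits of v, most significant first (fixed width L)
def pvFix : Nat → Nat → List Char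
  | 0, _ => []
  | L + 1, v => pvFix L (v / 16) ++ [pvHexDigitChar (v % 16)]

-- hex(n)[2:] for n ≥ 0 (exact: lowercase, no leading zeros, "0" for 0)
def pvHex (n : Nat) : List Char := pvFix (pvHexLen n) n

-- ===== PORT A =====
def decimal_to_hex_2s_complement (num : Int) (num_digits : Int) : String :=
  if num ≥ 0 then
    String.mk (PySem.Chars.upper (PySem.Chars.zfill (pvHex (num.toNat &&& (2 ^ 32 - 1))) num_digits))
  else
    let pos_hex := PySem.Chars.zfill (pvHex ((-num).toNat &&& (2 ^ 32 - 1))) num_digits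
    let inv_hex := pos_hex.map (fun digit => pvHexDigitChar (15 - pvHexVal digit))
    -- inv_hex[::-1] is List.reverse (exact); result is built by prepending, carry is 0/1
    let r := inv_hex.reverse.foldl (fun (st : List Char × Nat) digit =>
      let current := pvHexVal digit + st.2
      if current > 15 then (pvHexDigitChar (current % 16) :: st.1, 1)
      else (pvHexDigitChar current :: st.1, 0)) (([] : List Char), 1)
    String.mk (PySem.Chars.upper (PySem.Chars.zfill r.1 num_digits))

-- ===== PORT B =====
def decimal_to_hex_2s_complement_alt (num : Int) (num_digits : Int) : String :=
  if num ≥ 0 then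
    String.mk (PySem.Chars.upper (PySem.Chars.zfill (pvHex (num.toNat &&& (2 ^ 32 - 1))) num_digits))
  else
    let m := (-num).toNat &&& (2 ^ 32 - 1)
    let w : Int := max ((pvHex m).length : Int) num_digits
    -- Python's 16**w - m is nonnegative here (m < 16^w), so Nat subtraction is exact
    let val := (16 ^ w.toNat - m) % 16 ^ w.toNat
    String.mk (PySem.Chars.upper (PySem.Chars.zfill (pvHex val) w))

-- ===== PRECONDITION & SPEC =====
def Spec_decimal_to_hex_2s_complement (num : Int) (num_digits : Int) (out : String) : Prop := out = decimal_to_hex_2s_complement_alt num num_digits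
instance (num : Int) (num_digits : Int) (out : String) : Decidable (Spec_decimal_to_hex_2s_complement num num_digits out) := by unfold Spec_decimal_to_hex_2s_complement; infer_instance

-- ===== CLAIM (what is proved, stated in full; the proofs are below) =====
def Claim_equal_decimal_to_hex_2s_complement : Prop := ∀ (num : Int) (num_digits : Int), Dom_decimal_to_hex_2s_complement num num_digits → Spec_decimal_to_hex_2s_complement num num_digits (decimal_to_hex_2s_complement num num_digits)

-- ===== LEMMAS AND PROOFS =====

theorem pvHexVal_pvHexDigitChar (d : Nat) (h : d < 16) : pvHexVal (pvHexDigitChar d) = d := by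
  interval_cases d <;> decide

theorem mem_pvFix (L v : Nat) (c : Char) (h : c ∈ pvFix L v) : ∃ d, d < 16 ∧ c = pvHexDigitChar d := by
  induction L generalizing v with
  | zero => simp [pvFix] at h
  | succ L ih =>
    simp only [pvFix, List.mem_append, List.mem_singleton] at h
    rcases h with h | h
    · exact ih _ h
    · exact ⟨v % 16, Nat.mod_lt _ (by omega), h⟩

theorem length_pvFix (L v : Nat) : (pvFix L v).length = L := by
  induction L generalizing v with
  | zero => rfl
  | succ L ih => simp [pvFix, ih]

theorem lt_pow_pvHexLen (n : Nat) : n < 16 ^ pvHexLen n := by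
  induction n using Nat.strong_induction_on with
  | _ n ih =>
    rw [pvHexLen]
    split
    · simpa using ‹n < 16›
    · have h16 : 16 ≤ n := by omega
      have := ih (n / 16) (Nat.div_lt_self (by omega) (by omega))
      rw [pow_succ]
      omega

theorem pvHexLen_pos (n : Nat) : 1 ≤ pvHexLen n := by
  rw [pvHexLen]; split <;> omega

theorem pvHexLen_le (v L : Nat) (hL : 1 ≤ L) (hv : v < 16 ^ L) : pvHexLen v ≤ L := by
  induction v using Nat.strong_induction_on generalizing L with
  | _ v ih =>
    rw [pvHexLen]
    split
    · omega
    · have h16 : 16 ≤ v := by omega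
      have hL2 : 2 ≤ L := by
        by_contra hc
        have : L = 1 := by omega
        subst this; simp at hv; omega
      have hdiv : v / 16 < 16 ^ (L - 1) := by
        have : 16 ^ L = 16 ^ (L - 1) * 16 := by
          rw [← pow_succ]; congr 1; omega
        rw [this] at hv
        omega
      have := ih (v / 16) (Nat.div_lt_self (by omega) (by omega)) (L - 1) (by omega) hdiv
      omega

theorem pvFix_succ_of_lt (L v : Nat) (h : v < 16 ^ L) : pvFix (L + 1) v = '0' :: pvFix L v := by
  induction L generalizing v with
  | zero =>
    have : v = 0 := by simpa using h
    subst this; decide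
  | succ L ih =>
    have hdiv : v / 16 < 16 ^ L := by
      rw [pow_succ] at h; omega
    show pvFix (L + 1) (v / 16) ++ [pvHexDigitChar (v % 16)] = '0' :: (pvFix (L + 1) v)
    rw [ih _ hdiv]
    simp [pvFix]

theorem pvFix_add (L k v : Nat) (h : v < 16 ^ L) : pvFix (L + k) v = List.replicate k '0' ++ pvFix L v := by
  induction k with
  | zero => simp
  | succ k ih =>
    have hle : v < 16 ^ (L + k) :=
      lt_of_lt_of_le h (Nat.pow_le_pow_right (by omega) (by omega))
    have : L + (k + 1) = (L + k) + 1 := by omega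
    rw [this, pvFix_succ_of_lt _ _ hle, ih]
    simp [List.replicate_succ]

theorem zfill_no_sign (cs : List Char) (w : Int) (h : ∀ c ∈ cs, c ≠ '+' ∧ c ≠ '-') :
    PySem.Chars.zfill cs w = List.replicate (w.toNat - cs.length) '0' ++ cs := by
  unfold PySem.Chars.zfill
  split
  · have : w.toNat - cs.length = 0 := by omega
    rw [this]; simp
  · match cs with
    | [] => simp
    | c :: rest =>
      have hc := h c (by simp)
      dsimp only
      rw [if_neg (by tauto)]

theorem zfill_pvHex (n : Nat) (w : Int) :
    PySem.Chars.zfill (pvHex n) w = pvFix (max (pvHexLen n) w.toNat) n := by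
  rw [zfill_no_sign]
  · show List.replicate (w.toNat - (pvFix (pvHexLen n) n).length) '0' ++ pvFix (pvHexLen n) n = _
    rw [length_pvFix]
    have : max (pvHexLen n) w.toNat = pvHexLen n + (w.toNat - pvHexLen n) := by omega
    rw [this, pvFix_add _ _ _ (lt_pow_pvHexLen n)]
  · intro c hc
    obtain ⟨d, hd, rfl⟩ := mem_pvFix _ _ _ hc
    interval_cases d <;> decide

theorem map_inv_pvFix (L v : Nat) (h : v < 16 ^ L) :
    (pvFix L v).map (fun digit => pvHexDigitChar (15 - pvHexVal digit)) = pvFix L (16 ^ L - 1 - v) := by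
  induction L generalizing v with
  | zero => rfl
  | succ L ih =>
    have hp : 0 < 16 ^ L := Nat.pow_pos (by omega)
    rw [pow_succ] at h
    simp only [pvFix, List.map_append, List.map_cons, List.map_nil]
    rw [pvHexVal_pvHexDigitChar _ (Nat.mod_lt _ (by omega))]
    have hdiv : v / 16 < 16 ^ L := by omega
    rw [ih _ hdiv]
    have e1 : (16 ^ (L + 1) - 1 - v) / 16 = 16 ^ L - 1 - v / 16 := by
      rw [pow_succ]; omega
    have e2 : (16 ^ (L + 1) - 1 - v) % 16 = 15 - v % 16 := by
      rw [pow_succ]; omega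
    rw [e1, e2]

theorem foldl_carry (L v c : Nat) (suffix : List Char) (hv : v < 16 ^ L) (hc : c ≤ 1) :
    (pvFix L v).reverse.foldl (fun (st : List Char × Nat) digit =>
        let current := pvHexVal digit + st.2
        if current > 15 then (pvHexDigitChar (current % 16) :: st.1, 1)
        else (pvHexDigitChar current :: st.1, 0)) (suffix, c)
    = (pvFix L ((v + c) % 16 ^ L) ++ suffix, (v + c) / 16 ^ L) := by
  induction L generalizing v c suffix with
  | zero =>
    have : v = 0 := by simpa using hv
    subst this
    simp [pvFix]
  | succ L ih =>
    have hp : 0 < 16 ^ L := Nat.pow_pos (by omega)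
    rw [pow_succ] at hv
    simp only [pvFix, List.reverse_append, List.reverse_singleton, List.singleton_append,
      List.foldl_cons]
    rw [pvHexVal_pvHexDigitChar _ (Nat.mod_lt _ (by omega))]
    have hstep : (if v % 16 + c > 15 then (pvHexDigitChar ((v % 16 + c) % 16) :: suffix, 1)
        else (pvHexDigitChar (v % 16 + c) :: suffix, 0))
        = (pvHexDigitChar ((v % 16 + c) % 16) :: suffix, (v % 16 + c) / 16) := by
      split_ifs with hgt
      · have : (v % 16 + c) / 16 = 1 := by omega
        rw [this]
      · have e : (v % 16 + c) % 16 = v % 16 + c := by omega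
        have e' : (v % 16 + c) / 16 = 0 := by omega
        rw [e, e']
    simp only [hstep]
    have hdiv : v / 16 < 16 ^ L := by omega
    have hc' : (v % 16 + c) / 16 ≤ 1 := by omega
    rw [ih (v / 16) ((v % 16 + c) / 16) _ hdiv hc']
    by_cases hfull : v + c = 16 ^ L * 16
    · have hv15 : v % 16 = 15 := by omega
      have hc1 : c = 1 := by omega
      have hq : v / 16 = 16 ^ L - 1 := by omega
      have e1 : (v + c) % 16 ^ (L + 1) = 0 := by
        rw [pow_succ, hfull, Nat.mod_self]
      have e2 : (v + c) / 16 ^ (L + 1) = 1 := by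
        rw [pow_succ, hfull, Nat.div_self (by omega)]
      have e3 : v / 16 + (v % 16 + c) / 16 = 16 ^ L := by
        rw [hv15, hc1, hq]; omega
      have e4 : (v % 16 + c) % 16 = 0 := by omega
      rw [e1, e2, e3, Nat.mod_self, e4, Nat.div_self hp]
      simp
    · have hlt : v + c < 16 ^ L * 16 := by omega
      have e0 : (v + c) % 16 ^ (L + 1) = v + c := by
        rw [pow_succ]; exact Nat.mod_eq_of_lt hlt
      have esum : v / 16 + (v % 16 + c) / 16 = (v + c) / 16 := by omega
      have elt : (v + c) / 16 < 16 ^ L := by omega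
      have e1 : (v / 16 + (v % 16 + c) / 16) % 16 ^ L = (v + c) / 16 := by
        rw [esum]; exact Nat.mod_eq_of_lt elt
      have e2 : (v / 16 + (v % 16 + c) / 16) / 16 ^ L = 0 := by
        rw [esum]; exact Nat.div_eq_of_lt elt
      have e3 : (v + c) / 16 ^ (L + 1) = 0 := by
        rw [pow_succ]; exact Nat.div_eq_of_lt hlt
      have e5 : (v + c) % 16 = (v % 16 + c) % 16 := by omega
      rw [e0, e1, e2, e3]
      rw [e5, List.append_assoc, List.singleton_append]

theorem zfill_of_le (cs : List Char) (w : Int) (h : w ≤ (cs.length : Int)) :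
    PySem.Chars.zfill cs w = cs := by
  unfold PySem.Chars.zfill
  rw [if_pos h]

-- ===== VERDICT (by name: the statement is the Claim_ definition above) =====
theorem decimal_to_hex_2s_complement_spec : Claim_equal_decimal_to_hex_2s_complement := by
  intro num num_digits _
  unfold Spec_decimal_to_hex_2s_complement
  unfold decimal_to_hex_2s_complement decimal_to_hex_2s_complement_alt
  by_cases h : num ≥ 0
  · rw [if_pos h, if_pos h]
  · rw [if_neg h, if_neg h]
    simp only []
    set m := (-num).toNat &&& (2 ^ 32 - 1) with hm
    set L := max (pvHexLen m) num_digits.toNat with hL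
    have hL1 : 1 ≤ L := le_trans (pvHexLen_pos m) (le_max_left _ _)
    have hmL : m < 16 ^ L :=
      lt_of_lt_of_le (lt_pow_pvHexLen m) (Nat.pow_le_pow_right (by omega) (le_max_left _ _))
    have hpos : 0 < 16 ^ L := Nat.pow_pos (by omega)
    -- A side
    rw [zfill_pvHex, ← hL]
    rw [map_inv_pvFix _ _ hmL]
    rw [foldl_carry _ _ _ _ (by omega) (by omega)]
    have eval' : 16 ^ L - 1 - m + 1 = 16 ^ L - m := by omega
    rw [eval']
    rw [List.append_nil]
    rw [zfill_of_le _ _ (by rw [length_pvFix]; omega)]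
    -- B side
    have hlen : ((pvHex m).length : Int) = (pvHexLen m : Int) := by
      unfold pvHex; rw [length_pvFix]
    rw [hlen]
    have hw : (max ((pvHexLen m : Int)) num_digits).toNat = L := by omega
    rw [hw]
    rw [zfill_pvHex]
    have hvlt : (16 ^ L - m) % 16 ^ L < 16 ^ L := Nat.mod_lt _ hpos
    have : max (pvHexLen ((16 ^ L - m) % 16 ^ L)) (max ((pvHexLen m : Int)) num_digits).toNat = L := by
      rw [hw]
      exact Nat.max_eq_right (pvHexLen_le _ _ hL1 hvlt)
    rw [this]
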